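-- pv_equiv track=rewrite | github.com/jhoppmann/AdventOfCode | AoC2024/day05/day05.py | process_rule
-- ===== SOURCE A (Python) =====
-- def process_rule(ordering: list, rules: dict) -> bool:
--     correct = True
--     for i in range(0, len(ordering)):
--         if ordering[i] in rules:
--             mappings = rules[ordering[i]]
--             for mapping in mappings:
--                 if mapping in ordering and ordering.index(mapping) < i:
--                     correct = False
--     return correct
-- ===== SOURCE B (Python) =====
-- def process_rule(ordering: list, rules: dict) -> bool:
--     first = {}
--     last = {}
--     for i, x in enumerate(ordering):
--         first.setdefault(x, i)
--         last[x] = i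
--     n = len(ordering)
--     for key, mappings in rules.items():
--         if key in last:
--             lk = last[key]
--             for m in mappings:
--                 if first.get(m, n) < lk:
--                     return False
--     return True
-- ===== Notes on version B (the rewrite author's own statement) =====
-- stated objective: faster
-- what changed: Instead of A's scan over positions with nested 'm in ordering'/'ordering.index' list scans per rule entry, B first builds first- and last-occurrence index maps in one pass over the ordering and then iterates over the RULES, checking each rule once against the precomputed positions (first[m] < last[key]) with an early return.
import Mathlib
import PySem

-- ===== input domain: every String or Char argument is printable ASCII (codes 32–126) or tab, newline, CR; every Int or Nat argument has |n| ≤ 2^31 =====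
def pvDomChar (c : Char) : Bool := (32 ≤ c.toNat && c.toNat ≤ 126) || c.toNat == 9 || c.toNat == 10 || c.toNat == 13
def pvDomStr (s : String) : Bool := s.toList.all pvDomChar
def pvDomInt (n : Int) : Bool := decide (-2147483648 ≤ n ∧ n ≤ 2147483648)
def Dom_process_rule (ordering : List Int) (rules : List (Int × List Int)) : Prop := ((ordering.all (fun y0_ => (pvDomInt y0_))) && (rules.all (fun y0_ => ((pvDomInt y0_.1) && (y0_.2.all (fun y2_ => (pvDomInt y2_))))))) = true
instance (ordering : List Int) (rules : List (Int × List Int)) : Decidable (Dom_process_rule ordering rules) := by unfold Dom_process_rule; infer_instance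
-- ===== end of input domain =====

-- B precomputes first/last occurrence index maps in one pass over the ordering and then
-- checks each RULE once against them (with an early return), instead of A's scan over
-- positions with repeated list searches per rule entry.

-- ===== PORT A =====
def process_rule (ordering : List Int) (rules : List (Int × List Int)) : Bool :=
  (PySem.List.pyRange 0 (ordering.length : Int) 1).foldl
    (fun correct i =>
      if (PySem.Dict.mk rules).contains (PySem.List.pyGetD ordering i 0) then
        ((PySem.Dict.mk rules).getD (PySem.List.pyGetD ordering i 0) []).foldl
          (fun c m =>
            if ordering.contains m && (((PySem.List.index? ordering m).getD 0 : Int) < i)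
            then false else c) correct
      else correct) true

-- ===== PORT B =====
-- the first loop of Source B: first.setdefault(x, i); last[x] = i  over enumerate(ordering)
def pvPosMaps (ordering : List Int) : PySem.Dict Int Int × PySem.Dict Int Int :=
  (PySem.List.enumerate ordering).foldl
    (fun fd p => (fd.1.setdefault p.2 p.1, fd.2.insert p.2 p.1))
    (PySem.Dict.empty, PySem.Dict.empty)

-- the second loop of Source B, with the early `return False` as immediate result
def pvRuleLoop (n : Int) (first last : PySem.Dict Int Int) : List (Int × List Int) → Bool
  | [] => true
  | (key, ms) :: rest =>
      if last.contains key then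
        if ms.any (fun m => first.getD m n < last.getD key 0) then false
        else pvRuleLoop n first last rest
      else pvRuleLoop n first last rest

def process_rule_alt (ordering : List Int) (rules : List (Int × List Int)) : Bool :=
  pvRuleLoop (ordering.length : Int) (pvPosMaps ordering).1 (pvPosMaps ordering).2
    (PySem.Dict.mk rules).items

-- ===== PRECONDITION & SPEC =====
-- Pre_ excludes association lists with duplicate keys: they do not represent a Python dict
-- (dict keys are unique there), so behaviour on such lists is an artefact of the encoding.
def Pre_process_rule (ordering : List Int) (rules : List (Int × List Int)) : Prop :=
  (rules.map Prod.fst).Nodup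
instance (ordering : List Int) (rules : List (Int × List Int)) : Decidable (Pre_process_rule ordering rules) := by unfold Pre_process_rule; infer_instance

def pvWitness_process_rule : List Int × (List (Int × List Int)) := ([1, 2], [(1, [2])])

def Spec_process_rule (ordering : List Int) (rules : List (Int × List Int)) (out : Bool) : Prop := out = process_rule_alt ordering rules
instance (ordering : List Int) (rules : List (Int × List Int)) (out : Bool) : Decidable (Spec_process_rule ordering rules out) := by unfold Spec_process_rule; infer_instance

-- ===== CLAIM =====
def Claim_equal_process_rule : Prop := ∀ (ordering : List Int) (rules : List (Int × List Int)), Dom_process_rule ordering rules → Pre_process_rule ordering rules → Spec_process_rule ordering rules (process_rule ordering rules)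

-- ===== LEMMAS AND PROOFS =====

-- common declarative description: "some position j is preceded by a required-after element"
def pvViol (ordering : List Int) (rules : List (Int × List Int)) : Prop :=
  ∃ (j : Nat) (hj : j < ordering.length) (ms : List Int),
    (PySem.Dict.mk rules).get? ordering[j] = some ms ∧
    ∃ m ∈ ms, ∃ k : Nat, PySem.List.index? ordering m = some k ∧ k < j

theorem pvFoldFlag {α : Type} (p : α → Bool) :
    ∀ (xs : List α) (c : Bool),
      xs.foldl (fun c x => if p x then false else c) c = (c && !xs.any p) := by
  intro xs
  induction xs with
  | nil => intro c; simp
  | cons x xs ih =>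
      intro c
      rw [List.foldl_cons, ih]
      cases h : p x <;> simp [h]

theorem pvFoldAnd {α : Type} (g : α → Bool) :
    ∀ (xs : List α) (c : Bool),
      xs.foldl (fun c x => c && g x) c = (c && xs.all g) := by
  intro xs
  induction xs with
  | nil => intro c; simp
  | cons x xs ih => intro c; rw [List.foldl_cons, ih]; simp [Bool.and_assoc]

def pvGA (ordering : List Int) (rules : List (Int × List Int)) (i : Int) : Bool :=
  if (PySem.Dict.mk rules).contains (PySem.List.pyGetD ordering i 0) then
    !(((PySem.Dict.mk rules).getD (PySem.List.pyGetD ordering i 0) []).any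
        (fun m => ordering.contains m && (((PySem.List.index? ordering m).getD 0 : Int) < i)))
  else true

theorem pvA_eq_all (ordering : List Int) (rules : List (Int × List Int)) :
    process_rule ordering rules
      = (PySem.List.pyRange 0 (ordering.length : Int) 1).all (pvGA ordering rules) := by
  unfold process_rule
  have h : ∀ (c : Bool) (i : Int),
      (if (PySem.Dict.mk rules).contains (PySem.List.pyGetD ordering i 0) then
        ((PySem.Dict.mk rules).getD (PySem.List.pyGetD ordering i 0) []).foldl
          (fun c m =>
            if ordering.contains m && (((PySem.List.index? ordering m).getD 0 : Int) < i)
            then false else c) c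
      else c) = (c && pvGA ordering rules i) := by
    intro c i
    unfold pvGA
    split_ifs with hc
    · rw [pvFoldFlag]
    · simp
  simp only [h]
  rw [pvFoldAnd]
  simp

theorem pvA_iff (ordering : List Int) (rules : List (Int × List Int)) :
    process_rule ordering rules = true ↔ ¬ pvViol ordering rules := by
  rw [pvA_eq_all, List.all_eq_true]
  constructor
  · rintro h ⟨j, hj, ms, hms, m, hm, k, hk, hkj⟩
    have hmem : ((j : Nat) : Int) ∈ PySem.List.pyRange 0 (ordering.length : Int) 1 := by
      rw [PySem.List.mem_pyRange_one]
      constructor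
      · positivity
      · exact_mod_cast hj
    have hg := h _ hmem
    unfold pvGA at hg
    rw [PySem.List.pyGetD_natCast, List.getD_eq_getElem _ _ hj] at hg
    have hc : (PySem.Dict.mk rules).contains ordering[j] = true := by
      rw [PySem.Dict.contains_eq_isSome_get?, hms]; rfl
    rw [hc, if_pos rfl] at hg
    rw [PySem.Dict.getD_of_get?_eq_some _ [] hms] at hg
    have hmo : m ∈ ordering := (PySem.List.index?_isSome_iff _ _).mp (by rw [hk]; rfl)
    have hany : ms.any (fun m => ordering.contains m
        && (((PySem.List.index? ordering m).getD 0 : Int) < ((j : Nat) : Int))) = true := by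
      rw [List.any_eq_true]
      refine ⟨m, hm, ?_⟩
      rw [hk]
      simp only [Option.getD_some, Bool.and_eq_true, decide_eq_true_eq]
      refine ⟨by simpa using hmo, by exact_mod_cast hkj⟩
    rw [hany] at hg
    simp at hg
  · intro hnv i hmem
    rw [PySem.List.mem_pyRange_one] at hmem
    obtain ⟨h0, hn⟩ := hmem
    obtain ⟨j, rfl⟩ : ∃ j : Nat, i = (j : Int) := ⟨i.toNat, (Int.toNat_of_nonneg h0).symm⟩
    have hj : j < ordering.length := by exact_mod_cast hn
    unfold pvGA
    rw [PySem.List.pyGetD_natCast, List.getD_eq_getElem _ _ hj]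
    by_cases hc : (PySem.Dict.mk rules).contains ordering[j] = true
    · rw [hc, if_pos rfl]
      obtain ⟨ms, hms⟩ : ∃ ms, (PySem.Dict.mk rules).get? ordering[j] = some ms := by
        rw [PySem.Dict.contains_eq_isSome_get?] at hc
        exact Option.isSome_iff_exists.mp hc
      rw [PySem.Dict.getD_of_get?_eq_some _ [] hms]
      rw [Bool.not_eq_eq_eq_not, Bool.not_true, List.any_eq_false]
      intro m hm
      by_contra hb
      simp only [Bool.and_eq_true, decide_eq_true_eq] at hb
      obtain ⟨hcm, hlt⟩ := hb
      have hmo : m ∈ ordering := by simpa using hcm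
      obtain ⟨k, hk⟩ := Option.isSome_iff_exists.mp ((PySem.List.index?_isSome_iff _ _).mpr hmo)
      rw [hk] at hlt
      simp only [Option.getD_some] at hlt
      exact hnv ⟨j, hj, ms, hms, m, hm, k, hk, by exact_mod_cast hlt⟩
    · simp only [Bool.not_eq_true] at hc
      rw [hc]
      simp

theorem pvFoldFirst (m : Int) :
    ∀ (ps : List (Int × Int)) (fd : PySem.Dict Int Int × PySem.Dict Int Int),
      ((ps.foldl (fun fd p => (fd.1.setdefault p.2 p.1, fd.2.insert p.2 p.1)) fd).1).get? m
        = (fd.1.get? m).or ((ps.find? (fun p => p.2 == m)).map (·.1)) := by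
  intro ps
  induction ps with
  | nil => intro fd; simp
  | cons p ps ih =>
      intro fd
      rw [List.foldl_cons, ih]
      by_cases hm : p.2 = m
      · subst hm
        simp only [List.find?_cons, beq_self_eq_true]
        have : (fd.1.setdefault p.2 p.1).get? p.2 = some ((fd.1.get? p.2).getD p.1) :=
          PySem.Dict.get?_setdefault_self _ _ _
        rw [this]
        cases hg : fd.1.get? p.2 <;> simp [Option.or]
      · rw [PySem.Dict.get?_setdefault_of_ne _ _ (fun h => hm h.symm)]
        simp [hm]

theorem pvFoldLast (k : Int) :
    ∀ (ps : List (Int × Int)) (fd : PySem.Dict Int Int × PySem.Dict Int Int),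
      ((ps.foldl (fun fd p => (fd.1.setdefault p.2 p.1, fd.2.insert p.2 p.1)) fd).2).get? k
        = ((ps.reverse.find? (fun p => p.2 == k)).map (·.1)).or (fd.2.get? k) := by
  intro ps
  induction ps with
  | nil => intro fd; simp
  | cons p ps ih =>
      intro fd
      rw [List.foldl_cons, ih, List.reverse_cons, List.find?_append]
      rw [PySem.Dict.get?_insert]
      by_cases hk : p.2 = k
      · subst hk
        simp only [List.find?_cons, List.find?_nil, beq_self_eq_true]
        cases h : List.find? (fun p_1 => p_1.2 == p.2) ps.reverse <;> simp [Option.or]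
      · have hb : (p.2 == k) = false := by simp [hk]
        simp only [List.find?_cons, List.find?_nil, hb]
        rw [if_neg (fun h => hk h.symm)]
        cases h : List.find? (fun p => p.2 == k) ps.reverse <;> simp [Option.or]

theorem pvFindEnum (m : Int) :
    ∀ (xs : List Int) (s : Int),
      (PySem.List.enumerate xs s).find? (fun p => p.2 == m)
        = (PySem.List.index? xs m).map (fun k => (s + (k : Int), m)) := by
  intro xs
  induction xs with
  | nil => intro s; simp [PySem.List.enumerate, PySem.List.index?]
  | cons x xs ih =>
      intro s
      rw [PySem.List.enumerate_cons, List.find?_cons]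
      by_cases hx : x = m
      · subst hx
        rw [PySem.List.index?_cons_self]
        simp
      · have hb : ((s, x).2 == m) = false := by simp [hx]
        rw [hb, ih (s + 1), PySem.List.index?_cons_of_ne xs hx]
        cases h : PySem.List.index? xs m <;> simp
        ring

theorem pvFindEnumRev (k : Int) :
    ∀ (xs : List Int),
      ((PySem.List.enumerate xs 0).reverse).find? (fun p => p.2 == k)
        = (PySem.List.index? xs.reverse k).map
            (fun j => (((xs.length - 1 - j : Nat) : Int), k)) := by
  intro xs
  induction xs using List.reverseRecOn with
  | nil => simp [PySem.List.enumerate, PySem.List.index?]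
  | append_singleton ys a ih =>
      rw [PySem.List.enumerate_append, List.reverse_append,
         PySem.List.enumerate_cons, PySem.List.enumerate_nil]
      simp only [List.reverse_singleton, List.singleton_append, List.find?_cons]
      by_cases ha : a = k
      · subst ha
        rw [List.reverse_append]
        simp only [List.reverse_singleton, List.cons_append, List.nil_append]
        rw [PySem.List.index?_cons_self]
        simp
      · have hb : (((0 : Int) + (ys.length : Int), a).2 == k) = false := by simp [ha]
        rw [hb, ih, List.reverse_append]
        simp only [List.reverse_singleton, List.cons_append, List.nil_append]
        rw [PySem.List.index?_cons_of_ne ys.reverse ha]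
        cases h : PySem.List.index? ys.reverse k <;> simp
        omega

theorem pvFirst_get? (ordering : List Int) (m : Int) :
    (pvPosMaps ordering).1.get? m
      = (PySem.List.index? ordering m).map (fun k => (k : Int)) := by
  unfold pvPosMaps
  rw [pvFoldFirst, pvFindEnum]
  cases h : PySem.List.index? ordering m <;> simp [Option.or]

theorem pvLast_get? (ordering : List Int) (k : Int) :
    (pvPosMaps ordering).2.get? k
      = (PySem.List.index? ordering.reverse k).map
          (fun j => ((ordering.length - 1 - j : Nat) : Int)) := by
  unfold pvPosMaps
  rw [pvFoldLast, pvFindEnumRev]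
  cases h : PySem.List.index? ordering.reverse k <;> simp [Option.or]

-- the last-map returns the index of the LAST occurrence
theorem pvLast_spec (ordering : List Int) (key : Int) (lk : Int)
    (h : (pvPosMaps ordering).2.get? key = some lk) :
    ∃ j : Nat, lk = (j : Int) ∧ ∃ hj : j < ordering.length, ordering[j] = key ∧
      ∀ i : Nat, (hi : i < ordering.length) → ordering[i] = key → i ≤ j := by
  rw [pvLast_get?] at h
  cases hr : PySem.List.index? ordering.reverse key with
  | none => rw [hr] at h; exact absurd h (by simp)
  | some j0 =>
      rw [hr] at h
      simp only [Option.map_some, Option.some_inj] at h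
      obtain ⟨hj0, hrev, hmin⟩ := PySem.List.getElem_of_index?_eq_some hr
      rw [List.length_reverse] at hj0
      refine ⟨ordering.length - 1 - j0, by omega, by omega, ?_, ?_⟩
      · have := List.getElem_reverse (l := ordering) (i := j0) (by simpa using hj0)
        rw [← this]
        exact hrev
      · intro i hi hik
        by_contra hgt
        push Not at hgt
        have hlt : ordering.length - 1 - i < j0 := by omega
        have := hmin _ (by simpa using hlt)
        rw [List.getElem_reverse (by simp; omega)] at this
        have hEq : ordering.length - 1 - (ordering.length - 1 - i) = i := by omega
        simp only [hEq] at this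
        exact this hik

theorem pvRuleLoop_iff (n : Int) (first last : PySem.Dict Int Int) :
    ∀ (l : List (Int × List Int)),
      pvRuleLoop n first last l = true
        ↔ ∀ p ∈ l, last.contains p.1 = true →
            ∀ m ∈ p.2, ¬ (first.getD m n < last.getD p.1 0) := by
  intro l
  induction l with
  | nil => simp [pvRuleLoop]
  | cons p rest ih =>
      obtain ⟨key, ms⟩ := p
      show pvRuleLoop n first last ((key, ms) :: rest) = true ↔ _
      unfold pvRuleLoop
      by_cases hc : last.contains key = true
      · rw [if_pos hc]
        by_cases hv : ms.any (fun m => first.getD m n < last.getD key 0) = true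
        · rw [if_pos hv]
          simp only [List.any_eq_true, decide_eq_true_eq] at hv
          obtain ⟨m, hm, hlt⟩ := hv
          constructor
          · intro h; exact absurd h (by simp)
          · intro h
            exact absurd hlt (h (key, ms) (List.mem_cons_self) hc m hm)
        · rw [if_neg hv, ih]
          simp only [List.any_eq_true, decide_eq_true_eq, not_exists, not_and] at hv
          constructor
          · intro h q hq hcq m hm
            rcases List.mem_cons.mp hq with rfl | hq'
            · exact hv m hm
            · exact h q hq' hcq m hm
          · intro h q hq hcq m hm
            exact h q (List.mem_cons_of_mem _ hq) hcq m hm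
      · rw [if_neg hc, ih]
        constructor
        · intro h q hq hcq m hm
          rcases List.mem_cons.mp hq with rfl | hq'
          · exact absurd hcq hc
          · exact h q hq' hcq m hm
        · intro h q hq hcq m hm
          exact h q (List.mem_cons_of_mem _ hq) hcq m hm

theorem pvB_iff (ordering : List Int) (rules : List (Int × List Int))
    (hnd : (rules.map Prod.fst).Nodup) :
    process_rule_alt ordering rules = true ↔ ¬ pvViol ordering rules := by
  unfold process_rule_alt
  rw [pvRuleLoop_iff]
  have hkeys : (PySem.Dict.mk rules).keys.Nodup := by
    rw [PySem.Dict.keys_mk]; exact hnd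
  constructor
  · rintro h ⟨j, hj, ms, hms, m, hm, k, hk, hkj⟩
    set x := ordering[j] with hx
    have hitems : (x, ms) ∈ (PySem.Dict.mk rules).items :=
      PySem.Dict.mem_items_of_get?_eq_some _ hms
    have hxo : x ∈ ordering := List.getElem_mem hj
    have hsome : ((pvPosMaps ordering).2.get? x).isSome = true := by
      rw [pvLast_get?]
      have : x ∈ ordering.reverse := by simpa using hxo
      have := (PySem.List.index?_isSome_iff ordering.reverse x).mpr this
      cases hr : PySem.List.index? ordering.reverse x with
      | none => rw [hr] at this; simp at this
      | some j0 => simp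
    have hc : (pvPosMaps ordering).2.contains x = true := by
      rw [PySem.Dict.contains_eq_isSome_get?]; exact hsome
    obtain ⟨lk, hlk⟩ := Option.isSome_iff_exists.mp hsome
    obtain ⟨j0, rfl, hj0, hx0, hmax⟩ := pvLast_spec ordering x lk hlk
    have hjle : j ≤ j0 := hmax j hj hx.symm
    have hfirst : (pvPosMaps ordering).1.getD m (ordering.length : Int) = (k : Int) := by
      rw [PySem.Dict.getD_eq_get?_getD, pvFirst_get?, hk]; rfl
    have hlast : (pvPosMaps ordering).2.getD x 0 = (j0 : Int) := by
      rw [PySem.Dict.getD_eq_get?_getD, hlk]; rfl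
    have := h (x, ms) hitems hc m hm
    rw [hfirst, hlast] at this
    apply this
    exact_mod_cast Nat.lt_of_lt_of_le hkj hjle
  · rintro hnv ⟨key, ms⟩ hp hc m hm hlt
    simp only at hc hlt
    have hms : (PySem.Dict.mk rules).get? key = some ms :=
      (PySem.Dict.get?_eq_some_iff_mem_items _ _ _ hkeys).mpr hp
    rw [PySem.Dict.contains_eq_isSome_get?] at hc
    obtain ⟨lk, hlk⟩ := Option.isSome_iff_exists.mp hc
    obtain ⟨j0, rfl, hj0, hx0, hmax⟩ := pvLast_spec ordering key lk hlk
    rw [PySem.Dict.getD_eq_get?_getD, PySem.Dict.getD_eq_get?_getD, pvFirst_get?, hlk] at hlt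
    cases hkm : PySem.List.index? ordering m with
    | none =>
        rw [hkm] at hlt
        norm_num at hlt
        have : ordering.length ≤ j0 := by exact_mod_cast le_of_lt hlt
        omega
    | some k =>
        rw [hkm] at hlt
        norm_num at hlt
        have hkj : k < j0 := by exact_mod_cast hlt
        exact hnv ⟨j0, hj0, ms, by rw [hx0]; exact hms, m, hm, k, hkm, hkj⟩

-- ===== VERDICT =====
theorem process_rule_spec : Claim_equal_process_rule := by
  intro ordering rules _ hpre
  unfold Spec_process_rule
  have ha := pvA_iff ordering rules
  have hb := pvB_iff ordering rules hpre
  cases h : process_rule_alt ordering rules with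
  | true => exact ha.mpr (hb.mp h)
  | false =>
      cases h2 : process_rule ordering rules with
      | false => rfl
      | true => exact absurd (hb.mpr (ha.mp h2)) (by simp [h])
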